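-- pv_equiv track=rewrite | github.com/Adotac/Pagasa-WebScraper | typhoon_extraction_improved.py | _build_island_group_dict_from_warnings
-- ===== SOURCE A (Python) =====
-- from typing import Dict, List, Tuple, Optional, Any
--
-- def _build_island_group_dict_from_warnings(warnings_by_level: Dict[int, Dict[str, Optional[str]]], level: int) -> Dict:
--     """Build IslandGroupType dictionary for specific warning level"""
--     result = {
--         'Luzon': None,
--         'Visayas': None,
--         'Mindanao': None,
--         'Other': None
--     }
--
--     if level in warnings_by_level:
--         level_data = warnings_by_level[level]
--         for island_group, location_string in level_data.items():
--             if island_group in result: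
--                 result[island_group] = location_string
--
--     return result
-- ===== SOURCE B (Python) =====
-- from typing import Dict, Optional
--
-- _ISLAND_KEYS = ('Luzon', 'Visayas', 'Mindanao', 'Other')
--
-- def _build_island_group_dict_from_warnings(warnings_by_level: Dict[int, Dict[str, Optional[str]]], level: int) -> Dict:
--     """Build IslandGroupType dictionary for specific warning level"""
--     present = warnings_by_level.get(level, {})
--     return {k: present.get(k) for k in _ISLAND_KEYS}
-- ===== Notes on version B (the rewrite author's own statement) =====
-- stated objective: idiomatic
-- what changed: B inverts the traversal: instead of initialising a 4-key dict and looping over the level's items with a membership test that mutates matching slots, it looks the level up once and builds the result directly with a comprehension over the four fixed output keys, each looked up with .get; the membership guard and the mutation loop disappear.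
import Mathlib
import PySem

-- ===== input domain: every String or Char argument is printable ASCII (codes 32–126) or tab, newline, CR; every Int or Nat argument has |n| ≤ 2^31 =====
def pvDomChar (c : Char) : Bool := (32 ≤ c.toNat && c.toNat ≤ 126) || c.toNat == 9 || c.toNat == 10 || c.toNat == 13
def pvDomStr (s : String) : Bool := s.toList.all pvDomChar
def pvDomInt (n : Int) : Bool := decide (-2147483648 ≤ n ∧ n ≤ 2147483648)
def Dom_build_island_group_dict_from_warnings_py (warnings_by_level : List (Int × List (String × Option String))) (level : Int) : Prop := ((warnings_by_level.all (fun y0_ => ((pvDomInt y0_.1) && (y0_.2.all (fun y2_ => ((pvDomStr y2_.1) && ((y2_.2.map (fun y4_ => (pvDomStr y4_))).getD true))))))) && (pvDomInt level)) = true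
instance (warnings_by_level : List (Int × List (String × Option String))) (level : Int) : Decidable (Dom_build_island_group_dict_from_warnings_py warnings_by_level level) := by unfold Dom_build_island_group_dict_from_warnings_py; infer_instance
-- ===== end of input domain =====

-- B replaces A's mutate-in-place loop over the level's items by four direct .get lookups
-- over the fixed output keys (idiomatic; return-value equivalence, no argument is mutated).

-- ===== PORT A =====
def build_island_group_dict_from_warnings_py (warnings_by_level : List (Int × List (String × Option String))) (level : Int) : List (String × Option String) :=
  let result : PySem.Dict String (Option String) :=
    PySem.Dict.mk [("Luzon", none), ("Visayas", none), ("Mindanao", none), ("Other", none)]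
  let result :=
    -- `if level in warnings_by_level: level_data = warnings_by_level[level]; for … in level_data.items(): …`
    match PySem.Dict.get? (PySem.Dict.mk warnings_by_level) level with
    | some level_data =>
        level_data.foldl
          (fun (r : PySem.Dict String (Option String)) (p : String × Option String) => if r.contains p.1 then r.insert p.1 p.2 else r) result
    | none => result
  result.items

-- ===== PORT B =====
def build_island_group_dict_from_warnings_py_alt (warnings_by_level : List (Int × List (String × Option String))) (level : Int) : List (String × Option String) :=
  -- present = warnings_by_level.get(level, {})
  let present := (PySem.Dict.get? (PySem.Dict.mk warnings_by_level) level).getD []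
  -- {k: present.get(k) for k in _ISLAND_KEYS}
  ["Luzon", "Visayas", "Mindanao", "Other"].map
    (fun k => (k, (PySem.Dict.get? (PySem.Dict.mk present) k).join))

-- ===== PRECONDITION & SPEC =====
-- Pre_ excludes association lists whose inner list for the selected level repeats a key:
-- a Python dict cannot contain duplicate keys, so the list representation is ambiguous there
-- (A's loop keeps the last occurrence, B's .get the first).
def Pre_build_island_group_dict_from_warnings_py (warnings_by_level : List (Int × List (String × Option String))) (level : Int) : Prop :=
  ∀ p ∈ warnings_by_level, p.1 = level → (p.2.map Prod.fst).Nodup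
instance (warnings_by_level : List (Int × List (String × Option String))) (level : Int) : Decidable (Pre_build_island_group_dict_from_warnings_py warnings_by_level level) := by unfold Pre_build_island_group_dict_from_warnings_py; infer_instance

def pvWitness_build_island_group_dict_from_warnings_py : (List (Int × List (String × Option String))) × Int :=
  ([(1, [("Luzon", some "Ilocos"), ("Cebu", none)])], 1)

def Spec_build_island_group_dict_from_warnings_py (warnings_by_level : List (Int × List (String × Option String))) (level : Int) (out : List (String × Option String)) : Prop := out = build_island_group_dict_from_warnings_py_alt warnings_by_level level
instance (warnings_by_level : List (Int × List (String × Option String))) (level : Int) (out : List (String × Option String)) : Decidable (Spec_build_island_group_dict_from_warnings_py warnings_by_level level out) := by unfold Spec_build_island_group_dict_from_warnings_py; infer_instance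

-- ===== CLAIM (what is proved, stated in full; the proofs are below) =====
def Claim_equal_build_island_group_dict_from_warnings_py : Prop := ∀ (warnings_by_level : List (Int × List (String × Option String))) (level : Int), Dom_build_island_group_dict_from_warnings_py warnings_by_level level → Pre_build_island_group_dict_from_warnings_py warnings_by_level level → Spec_build_island_group_dict_from_warnings_py warnings_by_level level (build_island_group_dict_from_warnings_py warnings_by_level level)

-- ===== LEMMAS AND PROOFS =====

-- the step function of A's loop
def pvStep (r : PySem.Dict String (Option String)) (p : String × Option String) : PySem.Dict String (Option String) :=
  if r.contains p.1 then r.insert p.1 p.2 else r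

def pvMk4 (a b c d : Option String) : PySem.Dict String (Option String) :=
  PySem.Dict.mk [("Luzon", a), ("Visayas", b), ("Mindanao", c), ("Other", d)]

-- last-occurrence lookup with default (what A's overwrite loop computes per key)
def pvUpd (l : List (String × Option String)) (k : String) (dflt : Option String) : Option String :=
  l.foldl (fun acc p => if p.1 = k then p.2 else acc) dflt

lemma pvStep4 (a b c d : Option String) (k : String) (v : Option String) :
    pvStep (pvMk4 a b c d) (k, v) =
      pvMk4 (if k = "Luzon" then v else a) (if k = "Visayas" then v else b)
            (if k = "Mindanao" then v else c) (if k = "Other" then v else d) := by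
  by_cases h1 : k = "Luzon" <;> by_cases h2 : k = "Visayas" <;>
    by_cases h3 : k = "Mindanao" <;> by_cases h4 : k = "Other" <;>
    simp_all [pvStep, pvMk4, PySem.Dict.contains, PySem.Dict.insert] <;>
      rintro (h|h|h|h) <;> simp_all

lemma pvFold4 (l : List (String × Option String)) (a b c d : Option String) :
    l.foldl pvStep (pvMk4 a b c d) =
      pvMk4 (pvUpd l "Luzon" a) (pvUpd l "Visayas" b) (pvUpd l "Mindanao" c) (pvUpd l "Other" d) := by
  induction l generalizing a b c d with
  | nil => rfl
  | cons p t ih =>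
      obtain ⟨k, v⟩ := p
      simp only [List.foldl_cons, pvStep4, ih]
      rfl

lemma pvUpd_of_not_mem (l : List (String × Option String)) (k : String) (d : Option String)
    (h : k ∉ l.map Prod.fst) : pvUpd l k d = d := by
  induction l generalizing d with
  | nil => rfl
  | cons p t ih =>
      simp only [List.map_cons, List.mem_cons] at h
      rw [not_or] at h
      simpa [pvUpd, List.foldl_cons, (by simpa using Ne.symm h.1 : ¬ p.1 = k)] using ih d h.2

lemma pvUpd_eq_first (l : List (String × Option String)) (k : String)
    (h : (l.map Prod.fst).Nodup) :
    pvUpd l k none = (PySem.Dict.get? (PySem.Dict.mk l) k).join := by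
  induction l with
  | nil => rfl
  | cons p t ih =>
      obtain ⟨k', v⟩ := p
      simp only [List.map_cons, List.nodup_cons] at h
      by_cases hk : k' = k
      · subst hk
        have : pvUpd t k' v = v := pvUpd_of_not_mem t k' v h.1
        simp [pvUpd, List.foldl_cons, PySem.Dict.get?_mk_cons] at this ⊢
        simpa [pvUpd] using this
      · simpa [pvUpd, List.foldl_cons, hk, PySem.Dict.get?_mk_cons] using ih h.2

-- ===== VERDICT (by name: the statement is the Claim_ definition above) =====
theorem build_island_group_dict_from_warnings_py_spec : Claim_equal_build_island_group_dict_from_warnings_py := by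
  intro wbl level _ hpre
  unfold Spec_build_island_group_dict_from_warnings_py
  unfold build_island_group_dict_from_warnings_py build_island_group_dict_from_warnings_py_alt
  cases hget : PySem.Dict.get? (PySem.Dict.mk wbl) level with
  | none => rfl
  | some ld =>
      have hmem : (level, ld) ∈ (PySem.Dict.mk wbl).items :=
        PySem.Dict.mem_items_of_get?_eq_some (PySem.Dict.mk wbl) hget
      have hnd : (ld.map Prod.fst).Nodup := hpre (level, ld) (by simpa [PySem.Dict.items, PySem.Dict.mk] using hmem) rfl
      show (ld.foldl pvStep (pvMk4 none none none none)).items = _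
      rw [pvFold4]
      simp [pvMk4, List.map, pvUpd_eq_first ld _ hnd]
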